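-- pv_equiv track=rewrite | github.com/TonicStark/studymate | main.py | extract_title_and_paragraphs
-- ===== SOURCE A (Python) =====
-- def extract_title_and_paragraphs(file_content: str) -> tuple[str, dict]:
--     lines = file_content.split('\n')
--     main_title = ''
--     paragraphs = {}
--
--     current_title = ''
--     current_paragraph = []
--
--     for line in lines:
--         line = line.strip()
--         if line.startswith('#'):
--             if not main_title:
--                 main_title = line[1:]
--             else:
--                 if current_paragraph:
--                     paragraphs[current_title] = ' '.join(
--                         current_paragraph).strip()
--                 current_title = line[1:]
--                 current_paragraph = []
--         elif line.startswith('##'):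
--             current_title = line[2:]
--         elif current_title:
--             current_paragraph.append(line)
--
--     if current_title and current_paragraph:
--         paragraphs[current_title] = ' '.join(current_paragraph).strip()
--
--     # Remove '#' and space before each paragraph title
--     paragraphs = {
--         title.strip('# '): content for title,
--         content in paragraphs.items()}
--
--     return main_title, paragraphs
-- ===== SOURCE B (Python) =====
-- def extract_title_and_paragraphs(file_content: str) -> tuple[str, dict]:
--     lines = [l.strip() for l in file_content.split('\n')]
--
--     # Phase 1: scan for the main title (first '#' line with a non-empty remainder).
--     i = 0
--     main_title = ''
--     while i < len(lines) and not main_title: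
--         if lines[i].startswith('#'):
--             main_title = lines[i][1:]
--         i += 1
--
--     # Phase 2: split the remaining lines into sections delimited by '#' lines.
--     sections = []
--     title, body = '', []
--     for line in lines[i:]:
--         if line.startswith('#'):
--             sections.append((title, body))
--             title, body = line[1:], []
--         else:
--             body.append(line)
--     sections.append((title, body))
--
--     # Emit one dict entry per titled, non-empty section (last wins on duplicates).
--     raw = {}
--     for t, b in sections:
--         if t and b:
--             raw[t] = ' '.join(b).strip()
--
--     return main_title, {t.strip('# '): c for t, c in raw.items()}
-- ===== Notes on version B (the rewrite author's own statement) =====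
-- stated objective: alternative
-- what changed: A's single stateful pass with flush-on-header bookkeeping is replaced by a three-phase decomposition: hunt the main title, split the remaining lines into header-delimited (title, body) sections, then build the dict from the section list.
import Mathlib
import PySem

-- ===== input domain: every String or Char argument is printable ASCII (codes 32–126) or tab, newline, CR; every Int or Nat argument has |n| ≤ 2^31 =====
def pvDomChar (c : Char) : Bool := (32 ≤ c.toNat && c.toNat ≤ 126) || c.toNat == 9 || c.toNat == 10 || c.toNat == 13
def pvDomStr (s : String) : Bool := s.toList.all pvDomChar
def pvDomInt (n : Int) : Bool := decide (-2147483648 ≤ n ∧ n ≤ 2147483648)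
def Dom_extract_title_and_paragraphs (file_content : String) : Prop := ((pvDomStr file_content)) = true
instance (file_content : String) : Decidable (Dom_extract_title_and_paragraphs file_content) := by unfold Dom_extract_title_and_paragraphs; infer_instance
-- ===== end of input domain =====

-- B re-decomposes A's single stateful pass as: find the main title, split the rest into
-- header-delimited sections, then emit the dict from the section list (objective: alternative).


-- state of A's loop: (main_title, paragraphs, current_title, current_paragraph)
abbrev PvSt := String × PySem.Dict String String × String × List String

-- shared by both ports: the final dict comprehension {title.strip('# '): content for …}
def pvRestrip (d : PySem.Dict String String) : PySem.Dict String String :=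
  d.items.foldl (fun acc p => acc.insert (PySem.Str.stripChars p.1 "# ") p.2) PySem.Dict.empty

-- ===== PORT A =====
-- loop body on the already-stripped line
def pvAStepS : PvSt → String → PvSt
  | (main_title, paragraphs, current_title, current_paragraph), line =>
    if PySem.Str.startswith line "#" then
      if main_title = "" then
        (PySem.Str.slice line (some 1) none, paragraphs, current_title, current_paragraph)
      else
        let paragraphs :=
          if current_paragraph ≠ [] then
            paragraphs.insert current_title (PySem.Str.strip (PySem.Str.join " " current_paragraph))
          else paragraphs
        (main_title, paragraphs, PySem.Str.slice line (some 1) none, [])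
    else if PySem.Str.startswith line "##" then
      (main_title, paragraphs, PySem.Str.slice line (some 2) none, current_paragraph)
    else if current_title ≠ "" then
      (main_title, paragraphs, current_title, current_paragraph ++ [line])
    else
      (main_title, paragraphs, current_title, current_paragraph)

-- loop body: 'line = line.strip()' then the branches
def pvAStep (st : PvSt) (line : String) : PvSt := pvAStepS st (PySem.Str.strip line)

-- the code after the loop: final flush, then the key-stripping dict comprehension
def pvAFinish : PvSt → String × (List (String × String))
  | (main_title, paragraphs, current_title, current_paragraph) =>
    let paragraphs :=
      if current_title ≠ "" ∧ current_paragraph ≠ [] then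
        paragraphs.insert current_title (PySem.Str.strip (PySem.Str.join " " current_paragraph))
      else paragraphs
    (main_title, (pvRestrip paragraphs).items)

def extract_title_and_paragraphs (file_content : String) : String × (List (String × String)) :=
  let lines := (PySem.Str.split? file_content "\n").getD []
  pvAFinish (lines.foldl pvAStep ("", PySem.Dict.empty, "", []))

-- ===== PORT B =====
-- phase 1: the while loop hunting the main title; returns (main_title, remaining lines)
def pvFindTitle : List String → String × List String
  | [] => ("", [])
  | l :: ls =>
    if PySem.Str.startswith l "#" then
      let m := PySem.Str.slice l (some 1) none
      if m = "" then pvFindTitle ls else (m, ls)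
    else pvFindTitle ls

-- phase 2: split into sections (title, body-lines) delimited by '#' lines
def pvSplitSecs (title : String) (body : List String) : List String → List (String × List String)
  | [] => [(title, body)]
  | l :: ls =>
    if PySem.Str.startswith l "#" then
      (title, body) :: pvSplitSecs (PySem.Str.slice l (some 1) none) [] ls
    else
      pvSplitSecs title (body ++ [l]) ls

-- emit one entry per titled non-empty section
def pvEmit (d : PySem.Dict String String) (secs : List (String × List String)) : PySem.Dict String String :=
  secs.foldl
    (fun d s =>
      if s.1 ≠ "" ∧ s.2 ≠ [] then d.insert s.1 (PySem.Str.strip (PySem.Str.join " " s.2)) else d)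
    d

def extract_title_and_paragraphs_alt (file_content : String) : String × (List (String × String)) :=
  let lines := ((PySem.Str.split? file_content "\n").getD []).map PySem.Str.strip
  let pr := pvFindTitle lines
  let raw := pvEmit PySem.Dict.empty (pvSplitSecs "" [] pr.2)
  (pr.1, (pvRestrip raw).items)

-- ===== PRECONDITION & SPEC =====
def Spec_extract_title_and_paragraphs (file_content : String) (out : String × (List (String × String))) : Prop := out = extract_title_and_paragraphs_alt file_content
instance (file_content : String) (out : String × (List (String × String))) : Decidable (Spec_extract_title_and_paragraphs file_content out) := by unfold Spec_extract_title_and_paragraphs; infer_instance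

-- ===== CLAIM (what is proved, stated in full; the proofs are below) =====
def Claim_equal_extract_title_and_paragraphs : Prop := ∀ (file_content : String), Dom_extract_title_and_paragraphs file_content → Spec_extract_title_and_paragraphs file_content (extract_title_and_paragraphs file_content)

-- ===== LEMMAS AND PROOFS =====

-- '##' is a '#'-prefixed line too, so A's second branch is unreachable
lemma pv_ss_of_ss2 (l : String) (h : PySem.Str.startswith l "##" = true) :
    PySem.Str.startswith l "#" = true := by
  simp only [PySem.Str.startswith_eq] at *
  rw [PySem.Chars.startswith_iff] at *
  exact List.IsPrefix.trans (by decide) h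

-- an untitled open section is never emitted, whatever body it has accumulated
lemma pvEmit_splitSecs_blank (ls : List String) (b b' : List String) (d : PySem.Dict String String) :
    pvEmit d (pvSplitSecs "" b ls) = pvEmit d (pvSplitSecs "" b' ls) := by
  induction ls generalizing b b' d with
  | nil => simp [pvSplitSecs, pvEmit]
  | cons l ls ih =>
    by_cases h : PySem.Str.startswith l "#" = true
    · simp only [pvSplitSecs, h, if_true]
      simp [pvEmit]
    · simp only [pvSplitSecs, h, if_false, Bool.false_eq_true]
      exact ih _ _ d

-- phase-2 correspondence: once the main title is fixed, A's fold + finish is B's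
-- section-splitting followed by emission
lemma pv_phase2 (ls : List String) (m : String) (d : PySem.Dict String String)
    (t : String) (p : List String) (hm : m ≠ "") (hp : p ≠ [] → t ≠ "") :
    pvAFinish (ls.foldl pvAStepS (m, d, t, p)) =
      (m, (pvRestrip (pvEmit d (pvSplitSecs t p ls))).items) := by
  induction ls generalizing d t p with
  | nil =>
    by_cases ht : t = ""
    · have hp0 : p = [] := by by_contra h; exact hp h ht
      simp [pvAFinish, pvSplitSecs, pvEmit, ht, hp0]
    · by_cases hp0 : p = []
      · simp [pvAFinish, pvSplitSecs, pvEmit, ht, hp0]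
      · simp [pvAFinish, pvSplitSecs, pvEmit, ht, hp0]
  | cons l ls ih =>
    by_cases h : PySem.Str.startswith l "#" = true
    · simp only [List.foldl_cons, pvAStepS, h, if_true, hm, if_false, pvSplitSecs, pvEmit,
        List.foldl_cons]
      by_cases hp0 : p = []
      · simp only [hp0, ne_eq, not_true_eq_false, if_false, and_false]
        exact ih d _ [] (by simp)
      · have ht : t ≠ "" := hp hp0
        simp only [ne_eq, hp0, not_false_eq_true, if_true, ht, and_self]
        exact ih _ _ [] (by simp)
    · have h2 : ¬ PySem.Str.startswith l "##" = true := fun hh => h (pv_ss_of_ss2 l hh)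
      by_cases ht : t = ""
      · have hp0 : p = [] := by by_contra hh; exact hp hh ht
        simp only [List.foldl_cons, pvAStepS, h, if_false, h2, ht, ne_eq, not_true_eq_false,
          Bool.false_eq_true, pvSplitSecs, hp0]
        rw [pvEmit_splitSecs_blank ls ([] ++ [l]) []]
        exact ih d "" [] (by simp)
      · simp only [List.foldl_cons, pvAStepS, h, if_false, h2, ht, ne_eq, not_false_eq_true,
          reduceIte, Bool.false_eq_true, pvSplitSecs]
        exact ih d t (p ++ [l]) (fun _ => ht)

-- phase-1 correspondence: while the main title is empty A's state is frozen at
-- ("", d, "", []), exactly B's title hunt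
lemma pv_phase1 (ls : List String) (d : PySem.Dict String String) :
    pvAFinish (ls.foldl pvAStepS ("", d, "", [])) =
      ((pvFindTitle ls).1, (pvRestrip (pvEmit d (pvSplitSecs "" [] (pvFindTitle ls).2))).items) := by
  induction ls generalizing d with
  | nil => simp [pvAFinish, pvFindTitle, pvSplitSecs, pvEmit]
  | cons l ls ih =>
    by_cases h : PySem.Str.startswith l "#" = true
    · by_cases hm : PySem.Str.slice l (some 1) none = ""
      · simp only [List.foldl_cons, pvAStepS, h, if_true, pvFindTitle, hm]
        exact ih d
      · simp only [List.foldl_cons, pvAStepS, h, if_true, pvFindTitle, hm, if_false]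
        exact pv_phase2 ls _ d "" [] hm (by simp)
    · have h2 : ¬ PySem.Str.startswith l "##" = true := fun hh => h (pv_ss_of_ss2 l hh)
      simp only [List.foldl_cons, pvAStepS, h, if_false, h2, Bool.false_eq_true, ne_eq,
        not_true_eq_false, reduceIte, pvFindTitle]
      exact ih d

-- ===== VERDICT (by name: the statement is the Claim_ definition above) =====
theorem extract_title_and_paragraphs_spec : Claim_equal_extract_title_and_paragraphs := by
  intro file_content _
  unfold Spec_extract_title_and_paragraphs extract_title_and_paragraphs
    extract_title_and_paragraphs_alt
  dsimp only
  have h := pv_phase1 (((PySem.Str.split? file_content "\n").getD []).map PySem.Str.strip)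
    PySem.Dict.empty
  rw [List.foldl_map] at h
  exact h
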